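-- pv_equiv track=rewrite | github.com/JHUISI/charm | charm/schemes/ibenc/ibenc_sw05.py | intersection_subset
-- ===== SOURCE A (Python) =====
-- def intersection_subset(w, wPrime, d):
--     S = []
--     for i in range(len(w)):
--         for j in range(len(wPrime)):
--             if(w[i] == wPrime[j]):
--                 S.append(w[i])
--
--     if(len(S) < d):
--         assert False, "Cannot decrypt.  w and w' do not have enough attributes in common."
--
--     S_sub  = [S[k] for k in range(d)]
--     return S_sub
-- ===== SOURCE B (Python) =====
-- def intersection_subset(w, wPrime, d):
--     out = []
--     need = d
--     i = 0
--     while need > 0: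
--         assert i < len(w), "Cannot decrypt.  w and w' do not have enough attributes in common."
--         k = wPrime.count(w[i])
--         if k > need:
--             k = need
--         out += [w[i]] * k
--         need -= k
--         i += 1
--     return out
-- ===== Notes on version B (the rewrite author's own statement) =====
-- stated objective: faster
-- what changed: replaced A's materialise-everything strategy (nested loops building the full multiset intersection, assert on its length, then slice) with a demand-driven single loop over w carrying a remaining-need counter that emits at most the needed copies per element and stops as soon as d are produced, asserting only if w is exhausted while elements are still needed; output-sensitive: it scans only the prefix of w needed to reach d instead of all n*m pairs
import Mathlib
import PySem

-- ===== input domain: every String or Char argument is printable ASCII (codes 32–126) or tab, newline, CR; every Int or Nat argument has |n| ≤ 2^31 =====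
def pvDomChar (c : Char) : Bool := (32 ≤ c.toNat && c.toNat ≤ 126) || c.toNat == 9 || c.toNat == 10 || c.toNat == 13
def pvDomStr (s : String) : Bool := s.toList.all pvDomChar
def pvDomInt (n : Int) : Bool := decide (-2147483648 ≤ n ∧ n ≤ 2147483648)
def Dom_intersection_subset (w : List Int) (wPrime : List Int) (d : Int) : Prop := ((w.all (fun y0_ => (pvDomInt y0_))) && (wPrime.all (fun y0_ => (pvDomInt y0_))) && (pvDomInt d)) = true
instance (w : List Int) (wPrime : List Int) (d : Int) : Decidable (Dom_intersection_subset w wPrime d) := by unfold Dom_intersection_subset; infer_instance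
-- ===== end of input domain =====

-- One honest line: B is a demand-driven loop over w with a remaining-need counter that stops
-- as soon as d elements are emitted, instead of A's materialise-everything-then-slice; alternative.

-- ===== PORT A =====
def intersection_subset (w : List Int) (wPrime : List Int) (d : Int) : List Int :=
  -- S = []; for i in range(len(w)): for j in range(len(wPrime)): if w[i]==wPrime[j]: S.append(w[i])
  let S : List Int :=
    (PySem.List.pyRange 0 (w.length : Int) 1).foldl (fun acc i =>
      (PySem.List.pyRange 0 (wPrime.length : Int) 1).foldl (fun acc2 j =>
        if PySem.List.pyGetD w i 0 == PySem.List.pyGetD wPrime j 0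
        then acc2 ++ [PySem.List.pyGetD w i 0] else acc2) acc) []
  -- (assert raises when len(S) < d: excluded by Pre_)
  -- S_sub = [S[k] for k in range(d)]
  (PySem.List.pyRange 0 d 1).map (fun k => PySem.List.pyGetD S k 0)

-- ===== PORT B =====
-- the while-loop of Source B: one call = one iteration; the i-index walk over w is the
-- structural recursion on the list, `need` is Source B's need counter
def altGo (wPrime : List Int) (ws : List Int) (need : Int) : List Int :=
  if need ≤ 0 then []            -- while-condition fails: loop ends, remaining out is []
  else
    match ws with
    | [] => []                   -- Python's assert fires here (i = len(w)): excluded by Pre_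
    | x :: rest =>
        let k := min ((wPrime.count x : Int)) need   -- k = wPrime.count(w[i]); if k > need: k = need
        List.replicate k.toNat x ++ altGo wPrime rest (need - k)

def intersection_subset_alt (w : List Int) (wPrime : List Int) (d : Int) : List Int :=
  altGo wPrime w d

-- ===== PRECONDITION & SPEC =====
-- Pre_ excludes exactly the inputs where A's assert fires (AssertionError): d must not exceed
-- the total number of common (multiset) matches; B raises there too.
def Pre_intersection_subset (w : List Int) (wPrime : List Int) (d : Int) : Prop :=
  d ≤ ((w.map (fun x => wPrime.count x)).sum : Int)
instance (w : List Int) (wPrime : List Int) (d : Int) : Decidable (Pre_intersection_subset w wPrime d) := by unfold Pre_intersection_subset; infer_instance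
def pvWitness_intersection_subset : List Int × List Int × Int := ([1, 2, 3, 2], [2, 4, 1], 2)

def Spec_intersection_subset (w : List Int) (wPrime : List Int) (d : Int) (out : List Int) : Prop := out = intersection_subset_alt w wPrime d
instance (w : List Int) (wPrime : List Int) (d : Int) (out : List Int) : Decidable (Spec_intersection_subset w wPrime d out) := by unfold Spec_intersection_subset; infer_instance

-- ===== CLAIM (what is proved, stated in full; the proofs are below) =====
def Claim_equal_intersection_subset : Prop := ∀ (w : List Int) (wPrime : List Int) (d : Int), Dom_intersection_subset w wPrime d → Pre_intersection_subset w wPrime d → Spec_intersection_subset w wPrime d (intersection_subset w wPrime d)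

-- ===== LEMMAS AND PROOFS =====

-- the common multiset A materialises, in w-order
def pvCommon (w wPrime : List Int) : List Int :=
  w.flatMap (fun x => List.replicate (wPrime.count x) x)

theorem pvCommon_length (w wPrime : List Int) :
    (pvCommon w wPrime).length = (w.map (fun x => wPrime.count x)).sum := by
  simp [pvCommon, List.length_flatMap]

-- A's inner loop appends x once per occurrence in wPrime
theorem inner_loop_eq (wPrime : List Int) (x : Int) (a : List Int) :
    wPrime.foldl (fun acc2 y => if x == y then acc2 ++ [x] else acc2) a
      = a ++ List.replicate (wPrime.count x) x := by
  induction wPrime generalizing a with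
  | nil => simp
  | cons y t ih =>
    simp only [List.foldl_cons, List.count_cons, ih]
    by_cases h : x = y
    · subst h
      simp [List.replicate_succ]
    · have h' : ¬ (y = x) := fun hh => h hh.symm
      simp [h, h', beq_iff_eq]

theorem foldl_rep (w wPrime : List Int) :
    ∀ a : List Int,
      w.foldl (fun acc x => acc ++ List.replicate (wPrime.count x) x) a = a ++ pvCommon w wPrime := by
  induction w with
  | nil => intro a; simp [pvCommon]
  | cons z t ih =>
    intro a
    simp only [List.foldl_cons, ih, pvCommon, List.flatMap_cons, List.append_assoc]

-- A's S equals pvCommon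
theorem sA_eq (w wPrime : List Int) :
    (PySem.List.pyRange 0 (w.length : Int) 1).foldl (fun acc i =>
      (PySem.List.pyRange 0 (wPrime.length : Int) 1).foldl (fun acc2 j =>
        if PySem.List.pyGetD w i 0 == PySem.List.pyGetD wPrime j 0
        then acc2 ++ [PySem.List.pyGetD w i 0] else acc2) acc) []
      = pvCommon w wPrime := by
  rw [PySem.List.foldl_pyRange_zero_pyGetD' w 0
    (fun acc x => (PySem.List.pyRange 0 (wPrime.length : Int) 1).foldl (fun acc2 j =>
        if x == PySem.List.pyGetD wPrime j 0 then acc2 ++ [x] else acc2) acc) []]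
  have hinner : ∀ (x : Int) (a : List Int),
      (PySem.List.pyRange 0 (wPrime.length : Int) 1).foldl (fun acc2 j =>
        if x == PySem.List.pyGetD wPrime j 0 then acc2 ++ [x] else acc2) a
        = a ++ List.replicate (wPrime.count x) x := by
    intro x a
    rw [PySem.List.foldl_pyRange_zero_pyGetD' wPrime 0
      (fun acc2 y => if x == y then acc2 ++ [x] else acc2) a]
    exact inner_loop_eq wPrime x a
  simp only [hinner]
  simpa using foldl_rep w wPrime []

-- the comprehension [S[k] for k in range(d)] is take, when d ≤ len(S)
theorem range_getD_eq_take (S : List Int) (d : Int) (h : d ≤ (S.length : Int)) :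
    (PySem.List.pyRange 0 d 1).map (fun k => PySem.List.pyGetD S k 0) = S.take d.toNat := by
  by_cases hd : d ≤ 0
  · rw [PySem.List.pyRange_one_eq_nil hd]
    have : d.toNat = 0 := by omega
    simp [this]
  · rw [not_le] at hd
    rw [PySem.List.pyRange_one]
    simp only [Int.sub_zero, List.map_map]
    have hlen : d.toNat ≤ S.length := by omega
    apply List.ext_getElem
    · simp [hlen]
    · intro k h1 h2
      simp only [List.getElem_map, List.getElem_range, Function.comp_apply]
      have hk : k < S.length := by simp at h1; omega
      have : PySem.List.pyGetD S (0 + (k : Int)) 0 = S[k] := by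
        rw [Int.zero_add]
        simp [PySem.List.pyGetD, PySem.List.pyGet?, PySem.List.pyIdx?, hk]
      rw [this]
      simp
  
-- B's demand-driven loop produces exactly the first `need` elements of pvCommon
theorem altGo_eq (wPrime : List Int) (ws : List Int) :
    ∀ need : Int, altGo wPrime ws need = (pvCommon ws wPrime).take need.toNat := by
  induction ws with
  | nil =>
    intro need
    unfold altGo
    simp [pvCommon]
  | cons x rest ih =>
    intro need
    unfold altGo
    by_cases h : need ≤ 0
    · have h0 : need.toNat = 0 := by omega
      simp [h, h0]
    · rw [if_neg h]
      simp only [pvCommon, List.flatMap_cons, List.take_append, List.take_replicate,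
        List.length_replicate, ih]
      have hc : (0 : Int) ≤ (wPrime.count x : Int) := by positivity
      congr 1
      · congr 1
        omega
      · congr 1
        omega

-- B equals take d of pvCommon
theorem b_eq (w wPrime : List Int) (d : Int) :
    intersection_subset_alt w wPrime d = (pvCommon w wPrime).take d.toNat := by
  unfold intersection_subset_alt
  exact altGo_eq wPrime w d

-- ===== VERDICT (by name: the statement is the Claim_ definition above) =====
theorem intersection_subset_spec : Claim_equal_intersection_subset := by
  intro w wPrime d _ hpre
  unfold Spec_intersection_subset
  rw [b_eq]
  show (PySem.List.pyRange 0 d 1).map (fun k => PySem.List.pyGetD _ k 0) = _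
  rw [sA_eq]
  apply range_getD_eq_take
  rw [pvCommon_length]
  exact hpre
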